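-- pv_equiv track=rewrite | github.com/alebossi96/librerieTesi | txt_to_matrix.py | closest_indexes
-- ===== SOURCE A (Python) =====
-- def closest_indexes(lst, elements):
--     # Initialize a list to store the indexes of the closest elements
--     closest_indexes = []
--     # Iterate over the elements
--     for element in elements:
--         # Initialize a variable to store the minimum distance so far
--         min_distance = float("inf")
--         # Initialize a variable to store the index of the closest element so far
--         min_index = 0
--         # Iterate over the elements in the list
--         for i, el in enumerate(lst):
--             # Calculate the absolute distance between the element and the input element
--             distance = abs(el - element)
--             # If the distance is less than the minimum distance so far, update the minimum distance and index
--             if distance < min_distance: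
--                 min_distance = distance
--                 min_index = i
--         # Add the index of the closest element to the list
--         closest_indexes.append(min_index)
--     # Return the list of indexes
--     return closest_indexes
-- ===== SOURCE B (Python) =====
-- def _bisect_left(a, x):
--     # hand-written bisect_left (stdlib bisect not imported by the original module)
--     lo, hi = 0, len(a)
--     while lo < hi:
--         mid = (lo + hi) // 2
--         if a[mid] < x:
--             lo = mid + 1
--         else:
--             hi = mid
--     return lo
--
--
-- def closest_indexes(lst, elements):
--     # index of the first occurrence of each distinct value, built once
--     first = {}
--     for i, v in enumerate(lst):
--         if v not in first:
--             first[v] = i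
--     # distinct values, strictly increasing
--     vals = sorted(first)
--     res = []
--     for e in elements:
--         j = _bisect_left(vals, e)
--         cands = []
--         if j < len(vals):
--             cands.append((vals[j] - e, first[vals[j]]))
--         if j > 0:
--             cands.append((e - vals[j - 1], first[vals[j - 1]]))
--         res.append(min(cands)[1])
--     return res
-- ===== Notes on version B (the rewrite author's own statement) =====
-- stated objective: faster
-- what changed: Instead of a full scan of lst per query, B builds a first-occurrence-index dict and a sorted list of the distinct values once, then answers each query by binary search, comparing only the two neighbouring values (tie broken by smaller first index).
-- outside the precondition, e.g. on closest_indexes([], [1]): A returns [0], B raises ValueError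
import Mathlib
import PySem

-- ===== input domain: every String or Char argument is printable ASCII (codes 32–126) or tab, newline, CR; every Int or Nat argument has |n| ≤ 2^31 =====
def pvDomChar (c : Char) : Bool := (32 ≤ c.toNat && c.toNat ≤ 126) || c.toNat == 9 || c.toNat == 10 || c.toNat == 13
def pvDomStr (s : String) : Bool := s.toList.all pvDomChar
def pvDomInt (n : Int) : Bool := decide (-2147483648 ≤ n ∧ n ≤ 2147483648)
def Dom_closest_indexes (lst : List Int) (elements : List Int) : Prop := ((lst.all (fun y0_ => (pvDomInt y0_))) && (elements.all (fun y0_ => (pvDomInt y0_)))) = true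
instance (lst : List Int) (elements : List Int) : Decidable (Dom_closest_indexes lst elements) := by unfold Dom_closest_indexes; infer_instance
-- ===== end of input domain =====

-- B replaces A's full scan of lst per query by a first-occurrence dict plus binary search
-- over the sorted distinct values (objective: faster, asymptotic O(m*n) → O((n+m) log n)).

-- ===== PORT A =====
-- float("inf") is modelled as `none`: every actual distance compares below it,
-- exactly as every float compares below inf in A's `distance < min_distance`.
def aStep (element : Int) (s : Option Int × Int) (p : Int × Int) : Option Int × Int :=
  let distance := |p.2 - element|
  match s.1 with
  | none => (some distance, p.1)
  | some md => if distance < md then (some distance, p.1) else s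

def aInner (lst : List Int) (element : Int) : Option Int × Int :=
  (PySem.List.enumerate lst).foldl (aStep element) (none, 0)

def closest_indexes (lst : List Int) (elements : List Int) : List Int :=
  elements.foldl (fun acc element => acc ++ [(aInner lst element).2]) []

-- ===== PORT B =====
-- Source B's first-occurrence dict: `if v not in first: first[v] = i`
def bStep (d : PySem.Dict Int Int) (p : Int × Int) : PySem.Dict Int Int :=
  if d.contains p.2 then d else d.insert p.2 p.1

def bFirst (lst : List Int) : PySem.Dict Int Int :=
  (PySem.List.enumerate lst).foldl bStep PySem.Dict.empty

-- per query: Source B's `_bisect_left` is exactly PySem.List.bisectLeft (the same lo/hi loop);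
-- `min(cands)` on 2-tuples is PySem.List.min2? (lexicographic first minimum)
def bBest (vals : List Int) (first : PySem.Dict Int Int) (e : Int) : Int :=
  let j := PySem.List.bisectLeft vals e
  let cands : List (Int × Int) :=
    (if j < vals.length then [(vals.getD j 0 - e, first.getD (vals.getD j 0) 0)] else []) ++
    (if 0 < j then [(e - vals.getD (j - 1) 0, first.getD (vals.getD (j - 1) 0) 0)] else [])
  ((PySem.List.min2? cands (fun c => c.1) (fun c => c.2)).map (fun c => c.2)).getD 0

def closest_indexes_alt (lst : List Int) (elements : List Int) : List Int :=
  let first := bFirst lst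
  let vals := PySem.List.sorted first.keys (fun x => x)
  elements.foldl (fun acc e => acc ++ [bBest vals first e]) []

-- ===== PRECONDITION & SPEC =====
-- Pre_ excludes an empty lst with nonempty elements: there A returns 0 per query,
-- which is not an index of any element of lst, while B's `min(cands)` raises ValueError.
def Pre_closest_indexes (lst : List Int) (elements : List Int) : Prop :=
  lst ≠ [] ∨ elements = []
instance (lst : List Int) (elements : List Int) : Decidable (Pre_closest_indexes lst elements) := by
  unfold Pre_closest_indexes; infer_instance
def pvWitness_closest_indexes : List Int × List Int := ([1, 3, 3, -2], [2, 5, -100])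

def Spec_closest_indexes (lst : List Int) (elements : List Int) (out : List Int) : Prop :=
  out = closest_indexes_alt lst elements
instance (lst : List Int) (elements : List Int) (out : List Int) : Decidable (Spec_closest_indexes lst elements out) := by
  unfold Spec_closest_indexes; infer_instance

-- ===== CLAIM (what is proved, stated in full; the proofs are below) =====
def Claim_equal_closest_indexes : Prop := ∀ (lst : List Int) (elements : List Int), Dom_closest_indexes lst elements → Pre_closest_indexes lst elements → Spec_closest_indexes lst elements (closest_indexes lst elements)

-- ===== LEMMAS AND PROOFS =====

-- `IsBest l e i`: i is the earliest index of l minimising |l[k] - e|.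
def IsBest (l : List Int) (e : Int) (i : Int) : Prop :=
  ∃ (k : Nat) (hk : k < l.length), i = (k : Int) ∧
    (∀ (j : Nat) (hj : j < l.length), |l[k] - e| ≤ |l[j] - e|) ∧
    (∀ (j : Nat) (hj : j < l.length), j < k → |l[k] - e| < |l[j] - e|)

theorem isBest_unique (l : List Int) (e : Int) (i i' : Int)
    (h : IsBest l e i) (h' : IsBest l e i') : i = i' := by
  obtain ⟨k, hk, rfl, hle, hlt⟩ := h
  obtain ⟨k', hk', rfl, hle', hlt'⟩ := h'
  rcases Nat.lt_trichotomy k k' with hc | hc | hc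
  · exact absurd (hle k' hk') (not_le.mpr (hlt' k hk hc))
  · exact congrArg _ hc
  · exact absurd (hle' k hk) (not_le.mpr (hlt k' hk' hc))


-- pure (option-free) inner step for A, once min_distance is a real number
def hStep (e : Int) (q : Int × Int) (p : Int × Int) : Int × Int :=
  if |p.2 - e| < q.1 then (|p.2 - e|, p.1) else q

theorem aInner_opt_fold (e : Int) (l : List Int) (s d i : Int) :
    (PySem.List.enumerate l s).foldl (aStep e) (some d, i) =
      (some ((PySem.List.enumerate l s).foldl (hStep e) (d, i)).1,
            ((PySem.List.enumerate l s).foldl (hStep e) (d, i)).2) := by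
  induction l generalizing s d i with
  | nil => simp [PySem.List.enumerate]
  | cons x xs ih =>
      rw [PySem.List.enumerate_cons]
      simp only [List.foldl_cons]
      by_cases hc : |x - e| < d
      · simpa [aStep, hStep, hc] using ih (s + 1) |x - e| s
      · simpa [aStep, hStep, hc] using ih (s + 1) d i

theorem hStep_inv (e : Int) (l : List Int) (s : Int) (q0 : Int × Int) :
    ((PySem.List.enumerate l s).foldl (hStep e) q0).1 ≤ q0.1 ∧
    (∀ (k : Nat) (hk : k < l.length),
      ((PySem.List.enumerate l s).foldl (hStep e) q0).1 ≤ |l[k] - e|) ∧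
    (((PySem.List.enumerate l s).foldl (hStep e) q0) = q0 ∨
      ∃ (k : Nat) (hk : k < l.length),
        ((PySem.List.enumerate l s).foldl (hStep e) q0) = (|l[k] - e|, s + (k : Int)) ∧
        ((PySem.List.enumerate l s).foldl (hStep e) q0).1 < q0.1 ∧
        ∀ (j : Nat) (hj : j < l.length), j < k →
          ((PySem.List.enumerate l s).foldl (hStep e) q0).1 < |l[j] - e|) := by
  induction l using List.reverseRecOn with
  | nil => simp [PySem.List.enumerate]
  | append_singleton xs y ih =>
      rw [PySem.List.enumerate_append, List.foldl_append]
      simp only [PySem.List.enumerate_cons, PySem.List.enumerate_nil, List.foldl_cons, List.foldl_nil]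
      set r := (PySem.List.enumerate xs s).foldl (hStep e) q0 with hr
      obtain ⟨h1, h2, h3⟩ := ih
      by_cases hc : |y - e| < r.1
      · -- new element wins
        refine ⟨?_, ?_, ?_⟩
        · simp only [hStep, hc, if_pos]
          exact le_of_lt (lt_of_lt_of_le hc h1)
        · intro k hk
          simp only [hStep, hc, if_pos]
          rcases Nat.lt_or_ge k xs.length with hlt | hge
          · rw [List.getElem_append_left hlt]
            exact le_of_lt (lt_of_lt_of_le hc (h2 k hlt))
          · have : k = xs.length := by simp at hk; omega
            subst this
            simp
        · right
          refine ⟨xs.length, by simp, ?_, ?_, ?_⟩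
          · simp [hStep, hc]
          · simp only [hStep, hc, if_pos]
            exact lt_of_lt_of_le hc h1
          · intro j hj hjk
            simp only [hStep, hc, if_pos]
            rw [List.getElem_append_left hjk]
            exact lt_of_lt_of_le hc (h2 j hjk)
      · -- old state kept
        have heq : hStep e r ((s + (xs.length : Int)), y) = r := by
          simp [hStep, hc]
        rw [heq]
        refine ⟨h1, ?_, ?_⟩
        · intro k hk
          rcases Nat.lt_or_ge k xs.length with hlt | hge
          · rw [List.getElem_append_left hlt]
            exact h2 k hlt
          · have : k = xs.length := by simp at hk; omega
            subst this
            simpa using le_of_not_gt hc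
        · rcases h3 with h | ⟨k, hk, hrk, hlt1, hall⟩
          · exact Or.inl h
          · right
            refine ⟨k, by simp; omega, ?_, hlt1, ?_⟩
            · rwa [List.getElem_append_left hk]
            · intro j hj hjk
              have hj' : j < xs.length := lt_trans hjk hk
              rw [List.getElem_append_left hj']
              exact hall j hj' hjk

theorem aInner_isBest (lst : List Int) (e : Int) (h : lst ≠ []) :
    IsBest lst e (aInner lst e).2 := by
  obtain ⟨x, xs, rfl⟩ := List.exists_cons_of_ne_nil h
  unfold aInner
  rw [PySem.List.enumerate_cons]
  simp only [List.foldl_cons]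
  have hfirst : aStep e (none, 0) (0, x) = (some |x - e|, 0) := by simp [aStep]
  rw [hfirst, aInner_opt_fold]
  set r := (PySem.List.enumerate xs (0 + 1)).foldl (hStep e) (|x - e|, 0) with hrdef
  obtain ⟨h1, h2, h3⟩ := hStep_inv e xs (0 + 1) (|x - e|, 0)
  rcases h3 with hq | ⟨k, hk, hrk, hlt1, hall⟩
  · -- result is the initial state: index 0
    rw [← hrdef] at hq
    refine ⟨0, by simp, by simp [hq], ?_, ?_⟩
    · intro j hj
      match j with
      | 0 => simp
      | j + 1 =>
          have hj' : j < xs.length := by simpa using hj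
          have := h2 j hj'
          rw [← hrdef, hq] at this
          simpa using this
    · intro j hj hj0; omega
  · -- result is some element of xs: index k+1
    rw [← hrdef] at hrk hlt1 hall
    refine ⟨k + 1, by simpa using hk, ?_, ?_, ?_⟩
    · simp only [hrk]; push_cast; ring
    · intro j hj
      have hrk1 : r.1 = |xs[k] - e| := by rw [hrk]
      match j with
      | 0 =>
          simp only [List.getElem_cons_succ, List.getElem_cons_zero]
          rw [← hrk1]; exact le_of_lt hlt1
      | j + 1 =>
          have hj' : j < xs.length := by simpa using hj
          simp only [List.getElem_cons_succ]
          rw [← hrk1]; exact h2 j hj'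
    · intro j hj hjk
      have hrk1 : r.1 = |xs[k] - e| := by rw [hrk]
      match j with
      | 0 =>
          simp only [List.getElem_cons_succ, List.getElem_cons_zero]
          rw [← hrk1]; exact hlt1
      | j + 1 =>
          have hj' : j < xs.length := by simpa using hj
          simp only [List.getElem_cons_succ]
          rw [← hrk1]; exact hall j hj' (by omega)

theorem bFirst_get (l : List Int) (s : Int) (d : PySem.Dict Int Int) (v : Int) :
    ((PySem.List.enumerate l s).foldl bStep d).get? v =
      if d.contains v = true then d.get? v
      else (List.idxOf? v l).map (fun k => s + (k : Int)) := by
  induction l generalizing s d with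
  | nil =>
      simp only [PySem.List.enumerate_nil, List.foldl_nil, List.idxOf?_nil]
      split_ifs with hc
      · rfl
      · exact (PySem.Dict.get?_eq_none_iff_contains d v).mpr (by simpa using hc)
  | cons x xs ih =>
      rw [PySem.List.enumerate_cons]
      simp only [List.foldl_cons]
      by_cases hcx : d.contains x = true
      · have hstep : bStep d (s, x) = d := by simp [bStep, hcx]
        rw [hstep, ih (s + 1) d]
        by_cases hcv : d.contains v = true
        · simp [hcv]
        · have hvx : (x == v) = false := by
            rw [beq_eq_false_iff_ne]
            intro hb; rw [hb] at hcx; exact hcv hcx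
          simp only [hcv, if_false, List.idxOf?_cons, hvx]
          cases hx : List.idxOf? v xs <;> simp [hx] <;> push_cast <;> ring
      · have hstep : bStep d (s, x) = d.insert x s := by simp [bStep, hcx]
        rw [hstep, ih (s + 1) (d.insert x s)]
        by_cases hvx : v = x
        · subst hvx
          simp only [PySem.Dict.contains_insert_self, if_pos, PySem.Dict.get?_insert_self]
          simp [hcx, List.idxOf?_cons]
        · have hvx' : (x == v) = false := by simp [Ne.symm hvx]
          rw [PySem.Dict.contains_insert, PySem.Dict.get?_insert_of_ne d s hvx]
          have hsimp : (v == x || d.contains v) = d.contains v := by simp [hvx]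
          rw [hsimp]
          by_cases hcv : d.contains v = true
          · simp [hcv]
          · simp only [hcv, if_false, List.idxOf?_cons, hvx']
            cases hx : List.idxOf? v xs <;> simp [hx] <;> push_cast <;> ring

theorem bFirst_get' (lst : List Int) (v : Int) :
    (bFirst lst).get? v = (List.idxOf? v lst).map (fun k => (k : Int)) := by
  unfold bFirst
  rw [bFirst_get]
  simp [PySem.Dict.contains_empty]

theorem bFirst_keys_nodup_aux (l : List Int) (s : Int) (d : PySem.Dict Int Int)
    (hd : d.keys.Nodup) : ((PySem.List.enumerate l s).foldl bStep d).keys.Nodup := by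
  induction l generalizing s d with
  | nil => simpa [PySem.List.enumerate_nil] using hd
  | cons x xs ih =>
      rw [PySem.List.enumerate_cons]
      simp only [List.foldl_cons]
      by_cases hcx : d.contains x = true
      · have hstep : bStep d (s, x) = d := by simp [bStep, hcx]
        rw [hstep]; exact ih (s + 1) d hd
      · have hstep : bStep d (s, x) = d.insert x s := by simp [bStep, hcx]
        rw [hstep]
        refine ih (s + 1) _ ?_
        rw [PySem.Dict.keys_insert_of_not_contains d s (by simpa using hcx)]
        have hx : x ∉ d.keys := fun hmem =>
          hcx ((PySem.Dict.contains_iff_mem_keys d x).mpr hmem)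
        simp only [List.nodup_append]
        refine ⟨hd, by simp, ?_⟩
        intro a ha b hb
        simp only [List.mem_singleton] at hb
        subst hb
        intro hax; subst hax; exact hx ha

theorem mem_bFirst_keys (lst : List Int) (v : Int) :
    v ∈ (bFirst lst).keys ↔ v ∈ lst := by
  rw [← PySem.Dict.contains_iff_mem_keys, PySem.Dict.contains_eq_isSome_get?, bFirst_get']
  rw [Option.isSome_map]
  cases hx : List.idxOf? v lst with
  | none =>
      exact ⟨fun h => absurd h (by simp), fun hmem => absurd hmem (List.idxOf?_eq_none_iff.mp hx)⟩
  | some k =>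
      obtain ⟨hk, hkv, -⟩ := List.idxOf?_eq_some_iff.mp hx
      exact ⟨fun _ => hkv ▸ List.getElem_mem hk, fun _ => rfl⟩


theorem min2?_pair (a b : Int × Int) :
    PySem.List.min2? [a, b] (fun c => c.1) (fun c => c.2) =
      if (b.1 < a.1 ∨ (¬ a.1 < b.1 ∧ b.2 < a.2)) then some b else some a := by
  simp [PySem.List.min2?]

theorem firstIdx_spec (lst : List Int) (w : Int) (hw : w ∈ lst) :
    ∃ (i0 : Nat) (h0 : i0 < lst.length), (bFirst lst).getD w 0 = (i0 : Int) ∧ lst[i0] = w ∧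
      ∀ (j : Nat) (hj : j < lst.length), j < i0 → lst[j] ≠ w := by
  cases hx : List.idxOf? w lst with
  | none => exact absurd hw (List.idxOf?_eq_none_iff.mp hx)
  | some i0 =>
      obtain ⟨h0, hv, hmin⟩ := List.idxOf?_eq_some_iff.mp hx
      refine ⟨i0, h0, ?_, hv, ?_⟩
      · have hg := bFirst_get' lst w
        rw [hx] at hg
        exact PySem.Dict.getD_of_get?_eq_some _ _ hg
      · intro j hj hji
        exact hmin j hji

theorem chosen_isBest (lst : List Int) (e : Int) (vals : List Int)
    (hmemv : ∀ v, v ∈ vals ↔ v ∈ lst) (c : Int × Int)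
    (hcmem : ∃ (k : Nat) (hk : k < vals.length), c = (|vals[k] - e|, (bFirst lst).getD vals[k] 0))
    (hcmin : ∀ (k : Nat) (hk : k < vals.length),
        c.1 ≤ |vals[k] - e| ∧ (c.1 = |vals[k] - e| → c.2 ≤ (bFirst lst).getD vals[k] 0)) :
    IsBest lst e c.2 := by
  obtain ⟨k0, hk0, hc⟩ := hcmem
  have hw : vals[k0] ∈ lst := (hmemv _).mp (List.getElem_mem hk0)
  obtain ⟨i0, h0, hgd, hvi, hfirst⟩ := firstIdx_spec lst vals[k0] hw
  have hc2 : c.2 = (i0 : Int) := by rw [hc]; exact hgd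
  have hc1 : c.1 = |lst[i0] - e| := by rw [hc, hvi]
  refine ⟨i0, h0, hc2, ?_, ?_⟩
  · intro j hj
    obtain ⟨k1, hk1, hv1⟩ := List.mem_iff_getElem.mp ((hmemv lst[j]).mpr (List.getElem_mem hj))
    have := (hcmin k1 hk1).1
    rw [hv1] at this
    rw [← hc1]; exact this
  · intro j hj hji
    by_contra hnot
    push_neg at hnot
    -- so |lst[j] - e| ≤ |lst[i0] - e|, combined with ≥ gives equality
    obtain ⟨k1, hk1, hv1⟩ := List.mem_iff_getElem.mp ((hmemv lst[j]).mpr (List.getElem_mem hj))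
    obtain ⟨hle1, heq1⟩ := hcmin k1 hk1
    simp only [hv1] at hle1 heq1
    have heq : c.1 = |lst[j] - e| := le_antisymm hle1 (hc1 ▸ hnot)
    have hidx := heq1 heq
    -- (bFirst lst).getD lst[j] 0 = first index of lst[j], which is ≤ j
    obtain ⟨i1, h1, hgd1, hvi1, hfirst1⟩ := firstIdx_spec lst lst[j] (List.getElem_mem hj)
    rw [hgd1] at hidx
    have hi1j : i1 ≤ j := by
      by_contra hgt
      push_neg at hgt
      exact hfirst1 j hj hgt rfl
    have : (i0 : Int) ≤ (i1 : Int) := hc2 ▸ hidx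
    omega

theorem bBest_isBest (lst : List Int) (e : Int) (h : lst ≠ []) :
    IsBest lst e (bBest (PySem.List.sorted (bFirst lst).keys (fun x => x)) (bFirst lst) e) := by
  have hmemv : ∀ v, v ∈ PySem.List.sorted (bFirst lst).keys (fun x => x) ↔ v ∈ lst := fun v =>
    (PySem.List.mem_sorted _ _ _ v).trans (mem_bFirst_keys lst v)
  generalize hvals : PySem.List.sorted (bFirst lst).keys (fun x => x) = vals at *
  have hnodupk : (bFirst lst).keys.Nodup :=
    bFirst_keys_nodup_aux lst 0 PySem.Dict.empty (by simp [PySem.Dict.keys_empty])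
  have hperm : vals.Perm (bFirst lst).keys := hvals ▸ PySem.List.sorted_perm _ _ _
  have hvnodup : vals.Nodup := hperm.nodup_iff.mpr hnodupk
  have hle : vals.Pairwise (fun a b => a ≤ b) := hvals ▸ PySem.List.sorted_pairwise (bFirst lst).keys (fun x => x)
  have hlt : vals.Pairwise (fun a b => a < b) :=
    (hle.and hvnodup).imp (fun hab => lt_of_le_of_ne hab.1 hab.2)
  have hvne : vals ≠ [] := by
    obtain ⟨x, xs, rfl⟩ := List.exists_cons_of_ne_nil h
    intro hv
    have := (hmemv x).mpr (by simp)
    rw [hv] at this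
    simp at this
  have hlen : 0 < vals.length := List.length_pos_of_ne_nil hvne
  obtain ⟨hjle, hlo, hhi⟩ := PySem.List.bisectLeft_spec vals e hle
  have hmono : ∀ (p q : Nat) (hp : p < vals.length) (hq : q < vals.length),
      p < q → vals[p]'hp < vals[q]'hq :=
    fun p q hp hq hpq => List.pairwise_iff_getElem.mp hlt p q hp hq hpq
  -- the shared argument: any candidate pair no worse (lexicographically) than the two
  -- neighbours of the insertion point is the overall earliest argmin
  have main : ∀ (c : Int × Int),
      (∃ (k : Nat) (hk : k < vals.length), c = (|vals[k] - e|, (bFirst lst).getD vals[k] 0)) →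
      (∀ hj : PySem.List.bisectLeft vals e < vals.length,
        c.1 ≤ |vals[PySem.List.bisectLeft vals e]'hj - e| ∧
        (c.1 = |vals[PySem.List.bisectLeft vals e]'hj - e| →
          c.2 ≤ (bFirst lst).getD (vals[PySem.List.bisectLeft vals e]'hj) 0)) →
      (∀ hj0 : 0 < PySem.List.bisectLeft vals e,
        ∀ hjm : PySem.List.bisectLeft vals e - 1 < vals.length,
        c.1 ≤ |vals[PySem.List.bisectLeft vals e - 1]'hjm - e| ∧
        (c.1 = |vals[PySem.List.bisectLeft vals e - 1]'hjm - e| →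
          c.2 ≤ (bFirst lst).getD (vals[PySem.List.bisectLeft vals e - 1]'hjm) 0)) →
      IsBest lst e c.2 := by
    intro c hcmem hR hL
    refine chosen_isBest lst e vals hmemv c hcmem ?_
    intro k hk
    rcases Nat.lt_trichotomy k (PySem.List.bisectLeft vals e) with hkj | hkj | hkj
    · -- k < j: vals[k] < e
      have hj0 : 0 < PySem.List.bisectLeft vals e := by omega
      have hjm : PySem.List.bisectLeft vals e - 1 < vals.length := by omega
      have hklt : vals[k] < e := hlo k hk hkj
      have hmlt : vals[PySem.List.bisectLeft vals e - 1] < e := hlo _ hjm (by omega)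
      obtain ⟨hL1, hL2⟩ := hL hj0 hjm
      rcases Nat.lt_or_ge k (PySem.List.bisectLeft vals e - 1) with hkm | hkm
      · -- strictly left of the left neighbour: strictly worse distance
        have hvk : vals[k] < vals[PySem.List.bisectLeft vals e - 1] := hmono k _ hk hjm hkm
        have hstrict : |vals[PySem.List.bisectLeft vals e - 1] - e| < |vals[k] - e| := by
          rw [abs_of_neg (by omega), abs_of_neg (by omega)]
          omega
        exact ⟨le_of_lt (lt_of_le_of_lt hL1 hstrict),
               fun heq => absurd heq (by have := lt_of_le_of_lt hL1 hstrict; omega)⟩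
      · -- k is the left neighbour
        have : k = PySem.List.bisectLeft vals e - 1 := by omega
        subst this
        exact ⟨hL1, hL2⟩
    · -- k = j: the right neighbour
      subst hkj
      exact hR hk
    · -- k > j: strictly right of the right neighbour
      have hjlt : PySem.List.bisectLeft vals e < vals.length := by omega
      have hje : e ≤ vals[PySem.List.bisectLeft vals e] := hhi _ hjlt (le_refl _)
      have hke : e ≤ vals[k] := hhi k hk (by omega)
      obtain ⟨hR1, hR2⟩ := hR hjlt
      have hvk : vals[PySem.List.bisectLeft vals e] < vals[k] := hmono _ k hjlt hk hkj
      have hstrict : |vals[PySem.List.bisectLeft vals e] - e| < |vals[k] - e| := by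
        rw [abs_of_nonneg (by omega), abs_of_nonneg (by omega)]
        omega
      exact ⟨le_of_lt (lt_of_le_of_lt hR1 hstrict),
             fun heq => absurd heq (by have := lt_of_le_of_lt hR1 hstrict; omega)⟩
  -- now evaluate bBest in the three shapes of the candidate list
  unfold bBest
  by_cases hjlt : PySem.List.bisectLeft vals e < vals.length
  · have hgR : vals.getD (PySem.List.bisectLeft vals e) 0 = vals[PySem.List.bisectLeft vals e] :=
      List.getD_eq_getElem vals 0 hjlt
    have hRabs : vals[PySem.List.bisectLeft vals e] - e = |vals[PySem.List.bisectLeft vals e] - e| :=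
      (abs_of_nonneg (by have := hhi _ hjlt (le_refl _); omega)).symm
    by_cases hj0 : 0 < PySem.List.bisectLeft vals e
    · -- both neighbours exist: two candidates
      have hjm : PySem.List.bisectLeft vals e - 1 < vals.length := by omega
      have hgL : vals.getD (PySem.List.bisectLeft vals e - 1) 0 = vals[PySem.List.bisectLeft vals e - 1] :=
        List.getD_eq_getElem vals 0 hjm
      have hLabs : e - vals[PySem.List.bisectLeft vals e - 1] = |vals[PySem.List.bisectLeft vals e - 1] - e| := by
        have := hlo _ hjm (by omega)
        rw [abs_of_neg (by omega)]
        ring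
      simp only [if_pos hjlt, if_pos hj0, hgR, hgL, List.singleton_append]
      rw [hRabs, hLabs, min2?_pair]
      split_ifs with hcond
      · -- left neighbour wins
        simp only [Option.map_some, Option.getD_some]
        refine main _ ⟨_, hjm, rfl⟩ ?_ ?_
        · intro _
          rcases hcond with hlt1 | ⟨hnlt, hlt2⟩
          · exact ⟨le_of_lt hlt1, fun heq => absurd heq (by omega)⟩
          · exact ⟨by omega, fun _ => le_of_lt hlt2⟩
        · intro _ _
          exact ⟨le_refl _, fun _ => le_refl _⟩
      · -- right neighbour wins
        push_neg at hcond
        simp only [Option.map_some, Option.getD_some]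
        refine main _ ⟨_, hjlt, rfl⟩ ?_ ?_
        · intro _
          exact ⟨le_refl _, fun _ => le_refl _⟩
        · intro _ _
          obtain ⟨hge, himp⟩ := hcond
          rcases lt_or_ge (|vals[PySem.List.bisectLeft vals e] - e|) (|vals[PySem.List.bisectLeft vals e - 1] - e|) with hlt1 | hge1
          · exact ⟨le_of_lt hlt1, fun heq => absurd heq (by omega)⟩
          · have heq1 : |vals[PySem.List.bisectLeft vals e] - e| = |vals[PySem.List.bisectLeft vals e - 1] - e| := by omega
            have := himp (by omega)
            exact ⟨by omega, fun _ => this⟩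
    · -- only the right neighbour: one candidate
      simp only [if_pos hjlt, if_neg hj0, List.append_nil, hgR]
      rw [hRabs]
      rw [show PySem.List.min2? [((|vals[PySem.List.bisectLeft vals e]'hjlt - e| : Int), (bFirst lst).getD (vals[PySem.List.bisectLeft vals e]'hjlt) 0)] (fun c => c.1) (fun c => c.2) = some (|vals[PySem.List.bisectLeft vals e]'hjlt - e|, (bFirst lst).getD (vals[PySem.List.bisectLeft vals e]'hjlt) 0) from rfl]
      simp only [Option.map_some, Option.getD_some]
      refine main _ ⟨_, hjlt, rfl⟩ ?_ ?_
      · intro _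
        exact ⟨le_refl _, fun _ => le_refl _⟩
      · intro hj0' _
        exact absurd hj0' hj0
  · -- j = length: only the left neighbour
    have hjeq : PySem.List.bisectLeft vals e = vals.length := by omega
    have hj0 : 0 < PySem.List.bisectLeft vals e := by omega
    have hjm : PySem.List.bisectLeft vals e - 1 < vals.length := by omega
    have hgL : vals.getD (PySem.List.bisectLeft vals e - 1) 0 = vals[PySem.List.bisectLeft vals e - 1] :=
      List.getD_eq_getElem vals 0 hjm
    have hLabs : e - vals[PySem.List.bisectLeft vals e - 1] = |vals[PySem.List.bisectLeft vals e - 1] - e| := by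
      have := hlo _ hjm (by omega)
      rw [abs_of_neg (by omega)]
      ring
    simp only [if_neg hjlt, if_pos hj0, List.nil_append, hgL]
    rw [hLabs]
    have : PySem.List.min2? [((|vals[PySem.List.bisectLeft vals e - 1] - e| : Int), (bFirst lst).getD vals[PySem.List.bisectLeft vals e - 1] 0)] (fun c => c.1) (fun c => c.2) = some (|vals[PySem.List.bisectLeft vals e - 1] - e|, (bFirst lst).getD vals[PySem.List.bisectLeft vals e - 1] 0) := rfl
    rw [this]
    simp only [Option.map_some, Option.getD_some]
    refine main _ ⟨_, hjm, rfl⟩ ?_ ?_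
    · intro hjlt'
      exact absurd hjlt' hjlt
    · intro _ _
      exact ⟨le_refl _, fun _ => le_refl _⟩

-- ===== VERDICT (by name: the statement is the Claim_ definition above) =====
theorem closest_indexes_spec : Claim_equal_closest_indexes := by
  intro lst elements _ hpre
  unfold Spec_closest_indexes closest_indexes closest_indexes_alt
  rcases hpre with hne | hel
  · simp only [PySem.List.foldl_append_singleton_eq_map, List.nil_append]
    exact List.map_congr_left (fun e _ =>
      isBest_unique lst e _ _ (aInner_isBest lst e hne) (bBest_isBest lst e hne))
  · subst hel; rfl
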